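-- pv_equiv track=rewrite | github.com/RESH-22/UNSTOP-100-DAYS-CODING-SPRINT | Day 2/PAIR OF SUBARRAYS.py | calculate_pairs
-- ===== SOURCE A (Python) =====
-- def calculate_pairs(n, arr):
--     from collections import defaultdict
--
--     prefix = [0] * (n + 1)
--     for i in range(n):
--         prefix[i + 1] = prefix[i] + arr[i]
--
--     count = 0
--     left_sums = defaultdict(int)
--
--     # Iterate over possible second subarray start
--     for start in range(1, n):
--
--         # Add all subarrays ending at start-1 into map
--         for L in range(start):
--             s = prefix[start] - prefix[L]
--             left_sums[s] += 1
--
--         # Now count matching subarrays starting at 'start'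
--         for R in range(start, n):
--             s = prefix[R + 1] - prefix[start]
--             count += left_sums[s]
--
--     return count
-- ===== SOURCE B (Python) =====
-- def calculate_pairs(n, arr):
--     # Direct enumeration: for every right subarray, count equal-sum left
--     # subarrays that end before it starts. No frequency map, no sweep.
--     prefix = [0] * (n + 1)
--     for i in range(n):
--         prefix[i + 1] = prefix[i] + arr[i]
--
--     total = 0
--     for i2 in range(1, n):
--         for j2 in range(i2, n):
--             s2 = prefix[j2 + 1] - prefix[i2]
--             for j1 in range(i2):
--                 for i1 in range(j1 + 1):
--                     if prefix[j1 + 1] - prefix[i1] == s2: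
--                         total += 1
--     return total
-- ===== Notes on version B (the rewrite author's own statement) =====
-- stated objective: simpler
-- what changed: Replaces A's boundary sweep with an incrementally grown sum-frequency defaultdict by a direct prefix-sum enumeration of all (left, right) subarray pairs with left.end < right.start, counting equal-sum pairs with no map at all.
import Mathlib
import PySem

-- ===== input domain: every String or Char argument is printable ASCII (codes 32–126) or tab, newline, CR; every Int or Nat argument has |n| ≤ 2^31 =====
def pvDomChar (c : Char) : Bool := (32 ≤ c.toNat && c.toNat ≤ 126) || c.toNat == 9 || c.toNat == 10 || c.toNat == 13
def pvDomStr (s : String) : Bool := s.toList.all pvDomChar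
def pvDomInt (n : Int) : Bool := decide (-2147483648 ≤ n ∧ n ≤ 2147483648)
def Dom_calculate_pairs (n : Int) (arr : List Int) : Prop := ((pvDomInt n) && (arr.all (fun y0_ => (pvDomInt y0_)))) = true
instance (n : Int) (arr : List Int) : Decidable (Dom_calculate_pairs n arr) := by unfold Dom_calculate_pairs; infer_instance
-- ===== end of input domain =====

-- B replaces A's boundary sweep with an incremental sum-frequency map by a direct
-- enumeration of all (left, right) subarray pairs via prefix sums: simpler, not faster.

-- ===== PORT A =====
-- shared by both ports: both Pythons build the identical prefix-sum list
-- 'prefix = [0]*(n+1); for i in range(n): prefix[i+1] = prefix[i] + arr[i]'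
-- (in-bounds list assignment ported as List.set; reads via pyGetD, exact under Pre_)
def pvPrefix (n : Int) (arr : List Int) : List Int :=
  (PySem.List.pyRange 0 n 1).foldl
    (fun p i => p.set (i + 1).toNat (PySem.List.pyGetD p i 0 + PySem.List.pyGetD arr i 0))
    (List.replicate (n + 1).toNat 0)

-- defaultdict(int): 'left_sums[s] += 1' is modify with default 0; the read
-- 'count += left_sums[s]' is getD s 0 (the default entry a defaultdict read
-- inserts carries value 0 and is never otherwise observed)
def calculate_pairs (n : Int) (arr : List Int) : Int :=
  let pref := pvPrefix n arr
  let res := (PySem.List.pyRange 1 n 1).foldl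
    (fun (st : Int × PySem.Dict Int Int) start =>
      let d1 := (PySem.List.pyRange 0 start 1).foldl
        (fun d L => d.modify (PySem.List.pyGetD pref start 0 - PySem.List.pyGetD pref L 0) 0 (· + 1)) st.2
      let c1 := (PySem.List.pyRange start n 1).foldl
        (fun c R => c + d1.getD (PySem.List.pyGetD pref (R + 1) 0 - PySem.List.pyGetD pref start 0) 0) st.1
      (c1, d1))
    (0, PySem.Dict.empty)
  res.1

-- ===== PORT B =====
def calculate_pairs_alt (n : Int) (arr : List Int) : Int :=
  let pref := pvPrefix n arr
  (PySem.List.pyRange 1 n 1).foldl (fun total i2 =>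
    (PySem.List.pyRange i2 n 1).foldl (fun t j2 =>
      let s2 := PySem.List.pyGetD pref (j2 + 1) 0 - PySem.List.pyGetD pref i2 0
      (PySem.List.pyRange 0 i2 1).foldl (fun t2 j1 =>
        (PySem.List.pyRange 0 (j1 + 1) 1).foldl (fun t3 i1 =>
          if PySem.List.pyGetD pref (j1 + 1) 0 - PySem.List.pyGetD pref i1 0 = s2 then t3 + 1 else t3) t2) t) total) 0

-- ===== PRECONDITION & SPEC =====
-- Pre_ excludes exactly n > len(arr), where A raises IndexError at 'arr[i]'.
def Pre_calculate_pairs (n : Int) (arr : List Int) : Prop := n ≤ (arr.length : Int)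
instance (n : Int) (arr : List Int) : Decidable (Pre_calculate_pairs n arr) := by
  unfold Pre_calculate_pairs; infer_instance
def pvWitness_calculate_pairs : Int × List Int := (3, [1, -1, 2])

def Spec_calculate_pairs (n : Int) (arr : List Int) (out : Int) : Prop := out = calculate_pairs_alt n arr
instance (n : Int) (arr : List Int) (out : Int) : Decidable (Spec_calculate_pairs n arr out) := by unfold Spec_calculate_pairs; infer_instance

-- ===== CLAIM (what is proved, stated in full; the proofs are below) =====
def Claim_equal_calculate_pairs : Prop := ∀ (n : Int) (arr : List Int), Dom_calculate_pairs n arr → Pre_calculate_pairs n arr → Spec_calculate_pairs n arr (calculate_pairs n arr)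

-- ===== LEMMAS AND PROOFS =====

-- number of left subarrays (i1, j1) with j1 < a - 1 ... precisely: sums of all
-- subarrays ending strictly before index a-1? pvN P a v counts, over st ∈ [1,a),
-- the L ∈ [0,st) with P st - P L = v.
def pvN (P : Int → Int) (a v : Int) : Int :=
  ((PySem.List.pyRange 1 a 1).map
    (fun st => (((PySem.List.pyRange 0 st 1).countP (fun L => P st - P L == v)) : Int))).sum

def pvDictFold (P : Int → Int) (a : Int) : PySem.Dict Int Int :=
  (PySem.List.pyRange 1 a 1).foldl
    (fun d st => (PySem.List.pyRange 0 st 1).foldl (fun d L => d.modify (P st - P L) 0 (· + 1)) d)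
    PySem.Dict.empty

def pvStepA (P : Int → Int) (n : Int) : (Int × PySem.Dict Int Int) → Int → (Int × PySem.Dict Int Int) :=
  fun st start =>
    let d1 := (PySem.List.pyRange 0 start 1).foldl
      (fun d L => d.modify (P start - P L) 0 (· + 1)) st.2
    let c1 := (PySem.List.pyRange start n 1).foldl
      (fun c R => c + d1.getD (P (R + 1) - P start) 0) st.1
    (c1, d1)

def pvStepB (P : Int → Int) (n : Int) : Int → Int → Int :=
  fun total i2 =>
    (PySem.List.pyRange i2 n 1).foldl (fun t j2 =>
      (PySem.List.pyRange 0 i2 1).foldl (fun t2 j1 =>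
        (PySem.List.pyRange 0 (j1 + 1) 1).foldl (fun t3 i1 =>
          if P (j1 + 1) - P i1 = P (j2 + 1) - P i2 then t3 + 1 else t3) t2) t) total

lemma pvGetD_fold_list (P : Int → Int) (l : List Int) :
    ∀ (d : PySem.Dict Int Int) (v : Int),
    (l.foldl (fun d st => (PySem.List.pyRange 0 st 1).foldl
        (fun d L => d.modify (P st - P L) 0 (· + 1)) d) d).getD v 0
      = d.getD v 0
        + (l.map (fun st => (((PySem.List.pyRange 0 st 1).countP
            (fun L => P st - P L == v)) : Int))).sum := by
  induction l with
  | nil => intro d v; simp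
  | cons a l ih =>
    intro d v
    simp only [List.foldl_cons, List.map_cons, List.sum_cons]
    rw [ih]
    have h1 : (PySem.List.pyRange 0 a 1).foldl (fun d L => d.modify (P a - P L) 0 (· + 1)) d
        = ((PySem.List.pyRange 0 a 1).map (fun L => P a - P L)).foldl
            (fun d x => d.modify x 0 (· + 1)) d := by
      rw [List.foldl_map]
    rw [h1, PySem.Dict.getD_foldl_modify_add_one]
    have h2 : ((PySem.List.pyRange 0 a 1).map (fun L => P a - P L)).count v
        = (PySem.List.pyRange 0 a 1).countP (fun L => P a - P L == v) := by
      simp [List.count, List.countP_map]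
      rfl
    rw [h2]; ring

lemma pvGetD_dictFold (P : Int → Int) (a v : Int) :
    (pvDictFold P a).getD v 0 = pvN P a v := by
  unfold pvDictFold pvN
  rw [pvGetD_fold_list]
  simp

lemma pvInnerB (P : Int → Int) (i2 s2 : Int) (t : Int) :
    (PySem.List.pyRange 0 i2 1).foldl (fun t2 j1 =>
        (PySem.List.pyRange 0 (j1 + 1) 1).foldl (fun t3 i1 =>
          if P (j1 + 1) - P i1 = s2 then t3 + 1 else t3) t2) t
      = t + pvN P (i2 + 1) s2 := by
  have hin : ∀ (t2 j1 : Int),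
      (PySem.List.pyRange 0 (j1 + 1) 1).foldl (fun t3 i1 =>
          if P (j1 + 1) - P i1 = s2 then t3 + 1 else t3) t2
        = t2 + (((PySem.List.pyRange 0 (j1 + 1) 1).countP
            (fun i1 => P (j1 + 1) - P i1 == s2)) : Int) := by
    intro t2 j1
    rw [PySem.List.foldl_ite_add_one]
    congr 2
  trans (PySem.List.pyRange 0 i2 1).foldl (fun t2 j1 => t2 +
      (((PySem.List.pyRange 0 (j1 + 1) 1).countP (fun i1 => P (j1 + 1) - P i1 == s2)) : Int)) t
  · apply PySem.List.foldl_congr_mem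
    intro acc x _
    exact hin acc x
  rw [PySem.List.foldl_add]
  congr 1
  unfold pvN
  rw [PySem.List.pyRange_one, PySem.List.pyRange_one]
  have he : (i2 - 0).toNat = (i2 + 1 - 1).toNat := by omega
  rw [he, List.map_map, List.map_map]
  apply congrArg
  apply List.map_congr_left
  intro k _
  simp only [Function.comp]
  have h0 : (0 : Int) + (k : Int) + 1 = 1 + (k : Int) := by ring
  rw [h0]

lemma pvOuter (P : Int → Int) (n : Int) :
    ∀ (k : Nat) (a c : Int), 1 ≤ a → (n - a).toNat = k →
    ((PySem.List.pyRange a n 1).foldl (pvStepA P n) (c, pvDictFold P a)).1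
      = (PySem.List.pyRange a n 1).foldl (pvStepB P n) c := by
  intro k
  induction k with
  | zero =>
    intro a c h1 h2
    have hna : n ≤ a := by omega
    rw [PySem.List.pyRange_one_eq_nil hna]
    simp
  | succ k ih =>
    intro a c h1 h2
    have ha : a < n := by omega
    rw [PySem.List.pyRange_one_cons ha]
    simp only [List.foldl_cons]
    have hd : (PySem.List.pyRange 0 a 1).foldl
        (fun d L => d.modify (P a - P L) 0 (· + 1)) (pvDictFold P a) = pvDictFold P (a + 1) := by
      unfold pvDictFold
      rw [PySem.List.pyRange_one_succ_right h1, List.foldl_append]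
      simp
    have hstepA : pvStepA P n (c, pvDictFold P a) a
        = ((PySem.List.pyRange a n 1).foldl
            (fun t R => t + pvN P (a + 1) (P (R + 1) - P a)) c, pvDictFold P (a + 1)) := by
      unfold pvStepA
      simp only [hd]
      refine Prod.ext ?_ rfl
      apply PySem.List.foldl_congr_mem
      intro acc x _
      rw [pvGetD_dictFold]
    have hstepB : pvStepB P n c a
        = (PySem.List.pyRange a n 1).foldl
            (fun t R => t + pvN P (a + 1) (P (R + 1) - P a)) c := by
      unfold pvStepB
      apply PySem.List.foldl_congr_mem
      intro acc x _
      exact pvInnerB P a (P (x + 1) - P a) acc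
    rw [hstepA, hstepB]
    exact ih (a + 1) _ (by omega) (by omega)

-- ===== VERDICT (by name: the statement is the Claim_ definition above) =====
theorem calculate_pairs_spec : Claim_equal_calculate_pairs := by
  intro n arr _ _
  unfold Spec_calculate_pairs calculate_pairs calculate_pairs_alt
  have h := pvOuter (fun i => PySem.List.pyGetD (pvPrefix n arr) i 0) n
      (n - 1).toNat 1 0 (by omega) rfl
  have h1 : pvDictFold (fun i => PySem.List.pyGetD (pvPrefix n arr) i 0) 1 = PySem.Dict.empty := by
    unfold pvDictFold
    rw [PySem.List.pyRange_one_eq_nil (by omega)]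
    rfl
  rw [h1] at h
  exact h
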